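-- pv_equiv track=rewrite | github.com/kmnhan/erlabpy | src/erlab/interactive/imagetool/manager/_modelview.py | _contiguous_runs
-- ===== SOURCE A (Python) =====
-- def _contiguous_runs(rows: list[int]) -> list[tuple[int, int]]:
--     """Convert sorted rows to list of (start, length).
--
--     Example: [2,3,4,7,8] -> [(2,3), (7,2)]
--     """
--     runs: list[tuple[int, int]] = []
--     if not rows:
--         return runs
--     start = prev = rows[0]
--     for r in rows[1:]:
--         if r == prev + 1:
--             prev = r
--             continue
--         runs.append((start, prev - start + 1))
--         start = prev = r
--     runs.append((start, prev - start + 1))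
--     return runs
-- ===== SOURCE B (Python) =====
-- def _contiguous_runs(rows: list[int]) -> list[tuple[int, int]]:
--     """Convert sorted rows to list of (start, length).
--
--     Staged passes with no loop-carried state: the key rows[i] - i is
--     constant exactly across a consecutive run, so run boundaries are the
--     indices where that key changes; pairing adjacent boundaries gives
--     each run's start index and length.
--     """
--     keys = [r - i for i, r in enumerate(rows)]
--     bounds = [i for i in range(len(rows)) if i == 0 or keys[i] != keys[i - 1]]
--     bounds.append(len(rows))
--     return [(rows[b], e - b) for b, e in zip(bounds, bounds[1:])]
-- ===== Notes on version B (the rewrite author's own statement) =====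
-- stated objective: alternative
-- what changed: Replaces A's single accumulator loop tracking start/prev with three staged passes and no loop-carried state: compute the value-minus-index key per element, collect the boundary indices where the key changes, and map adjacent boundary pairs to (start, length) runs.
import Mathlib
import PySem

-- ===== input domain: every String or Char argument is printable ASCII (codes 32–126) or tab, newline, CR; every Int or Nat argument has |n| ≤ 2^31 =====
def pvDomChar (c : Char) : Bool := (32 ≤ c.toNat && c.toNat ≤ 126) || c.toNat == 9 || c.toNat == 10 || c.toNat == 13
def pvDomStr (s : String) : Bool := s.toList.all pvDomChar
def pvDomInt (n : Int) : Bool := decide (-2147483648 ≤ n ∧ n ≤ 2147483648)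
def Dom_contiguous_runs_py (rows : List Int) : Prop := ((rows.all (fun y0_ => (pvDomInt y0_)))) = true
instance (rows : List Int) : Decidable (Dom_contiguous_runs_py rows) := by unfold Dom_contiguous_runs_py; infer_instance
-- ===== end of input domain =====

-- B replaces A's start/prev accumulator loop with three staged passes (keys,
-- boundary indices, adjacent-pair map) carrying no loop state (objective:
-- alternative, same O(n) cost).

-- ===== PORT A =====
-- A: track (runs, start, prev); flush a run at each break and once at the end.
def contiguous_runs_py (rows : List Int) : List (Int × Int) :=
  match rows with
  | [] => []
  | r0 :: tail =>
    let st := tail.foldl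
      (fun (st : List (Int × Int) × Int × Int) r =>
        let (runs, start, prev) := st
        if r = prev + 1 then (runs, start, r)
        else (runs ++ [(start, prev - start + 1)], r, r))
      ([], r0, r0)
    st.1 ++ [(st.2.1, st.2.2 - st.2.1 + 1)]

-- ===== PORT B =====
-- B step for step: keys = [r - i for i, r in enumerate(rows)];
-- bounds = [i for i in range(len(rows)) if i == 0 or keys[i] != keys[i-1]] + [len(rows)];
-- [(rows[b], e - b) for b, e in zip(bounds, bounds[1:])].
-- Indices here are Nats of range(len(rows)), always valid, so `getD` is exact
-- for Python's rows[b]/keys[i]; `i == 0 or …` short-circuits before keys[i-1].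
def contiguous_runs_py_alt (rows : List Int) : List (Int × Int) :=
  let keys := (PySem.List.enumerate rows).map (fun p => p.2 - p.1)
  let bounds := (List.range rows.length).filter
    (fun i => i == 0 || !(keys.getD i 0 == keys.getD (i - 1) 0))
  let bounds := bounds ++ [rows.length]
  (bounds.zip bounds.tail).map (fun p => (rows.getD p.1 0, (p.2 : Int) - (p.1 : Int)))

-- ===== PRECONDITION & SPEC =====
def Spec_contiguous_runs_py (rows : List Int) (out : List (Int × Int)) : Prop := out = contiguous_runs_py_alt rows
instance (rows : List Int) (out : List (Int × Int)) : Decidable (Spec_contiguous_runs_py rows out) := by unfold Spec_contiguous_runs_py; infer_instance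

-- ===== CLAIM (what is proved, stated in full; the proofs are below) =====
def Claim_equal_contiguous_runs_py : Prop := ∀ (rows : List Int), Dom_contiguous_runs_py rows → Spec_contiguous_runs_py rows (contiguous_runs_py rows)

-- ===== LEMMAS AND PROOFS =====

-- reference recursion both ports are reduced to: current run starts at `start`, last seen `prev`
def specRuns (start prev : Int) : List Int → List (Int × Int)
  | [] => [(start, prev - start + 1)]
  | r :: rest =>
    if r = prev + 1 then specRuns start r rest
    else (start, prev - start + 1) :: specRuns r r rest

-- A's fold with accumulator = specRuns with the accumulator prepended
theorem foldA_spec (l : List Int) : ∀ (acc : List (Int × Int)) (s p : Int),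
    (let st := l.foldl
      (fun (st : List (Int × Int) × Int × Int) r =>
        let (runs, start, prev) := st
        if r = prev + 1 then (runs, start, r)
        else (runs ++ [(start, prev - start + 1)], r, r))
      (acc, s, p)
     st.1 ++ [(st.2.1, st.2.2 - st.2.1 + 1)]) = acc ++ specRuns s p l := by
  induction l with
  | nil => intro acc s p; simp [specRuns]
  | cons r rest ih =>
    intro acc s p
    simp only [List.foldl_cons, specRuns]
    by_cases h : r = p + 1
    · simp [h, ih]
    · simp [h, ih, List.append_assoc]

theorem portA_eq_spec (r : Int) (rest : List Int) :
    contiguous_runs_py (r :: rest) = specRuns r r rest := by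
  simpa using foldA_spec rest [] r r

-- adjust the head run: start moved back by d, length grown by d
def bump (d : Int) : List (Int × Int) → List (Int × Int)
  | [] => []
  | (a, b) :: t => (a - d, b + d) :: t

theorem bump_bump (d e : Int) (l : List (Int × Int)) :
    bump d (bump e l) = bump (d + e) l := by
  cases l with
  | nil => rfl
  | cons x t => cases x; simp [bump]; constructor <;> ring

theorem specRuns_bump (l : List Int) : ∀ s p : Int,
    specRuns s p l = bump (p - s) (specRuns p p l) := by
  induction l with
  | nil => intro s p; simp [specRuns, bump]; ring
  | cons x t ih =>
    intro s p
    by_cases h : x = p + 1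
    · subst h
      have e1 : ∀ a b : Int, specRuns a b ((b + 1) :: t) = specRuns a (b + 1) t := by
        intro a b; simp [specRuns]
      rw [e1, e1, ih s (p + 1), ih p (p + 1), bump_bump]
      ring_nf
    · simp [specRuns, h, bump]; ring

-- interior break indices of rows: i ≥ 1 with rows[i] ≠ rows[i-1] + 1
def innerBreaks (rows : List Int) : List Nat :=
  (List.range rows.length).filter
    (fun i => !(i == 0) && !(rows.getD i 0 == rows.getD (i - 1) 0 + 1))

-- map over adjacent boundary pairs
def mapAdj (rows : List Int) : List Nat → List (Int × Int)
  | b :: e :: rest => (rows.getD b 0, (e : Int) - (b : Int)) :: mapAdj rows (e :: rest)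
  | _ => []

theorem zip_tail_eq_mapAdj (rows : List Int) (l : List Nat) :
    (l.zip l.tail).map (fun p => (rows.getD p.1 0, (p.2 : Int) - (p.1 : Int)))
      = mapAdj rows l := by
  induction l with
  | nil => rfl
  | cons b t ih =>
    cases t with
    | nil => rfl
    | cons e rest => simp only [List.tail_cons, List.zip_cons_cons, List.map_cons, mapAdj]
                     rw [← ih]; rfl

-- the i-th key is rows[i] - i for i < n
theorem keys_getD (rows : List Int) (i : Nat) (h : i < rows.length) :
    ((PySem.List.enumerate rows).map (fun p => p.2 - p.1)).getD i 0
      = rows.getD i 0 - (i : Int) := by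
  have hl : i < ((PySem.List.enumerate rows).map (fun p => p.2 - p.1)).length := by
    simp [PySem.List.length_enumerate, h]
  rw [List.getD_eq_getElem _ _ hl, List.getD_eq_getElem _ _ h]
  simp [PySem.List.getElem_enumerate]

-- B's filter predicate agrees, on valid indices, with "i = 0 or a break"
theorem filter_pred_eq (rows : List Int) :
    (List.range rows.length).filter
        (fun i => i == 0 ||
          !(((PySem.List.enumerate rows).map (fun p => p.2 - p.1)).getD i 0 ==
            ((PySem.List.enumerate rows).map (fun p => p.2 - p.1)).getD (i - 1) 0))
      = (List.range rows.length).filter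
        (fun i => i == 0 || !(rows.getD i 0 == rows.getD (i - 1) 0 + 1)) := by
  apply List.filter_congr
  intro i hi
  rw [List.mem_range] at hi
  by_cases h0 : i = 0
  · simp [h0]
  · have h1 : 1 ≤ i := Nat.one_le_iff_ne_zero.mpr h0
    have hkey := keys_getD rows i hi
    have hkey' := keys_getD rows (i - 1) (by omega)
    have hc : ((i - 1 : Nat) : Int) = (i : Int) - 1 := by omega
    simp only [List.getD_eq_getElem?_getD] at hkey hkey' ⊢
    rw [hkey, hkey', hc]
    have hb : (rows[i]?.getD 0 - (i : Int) == rows[i - 1]?.getD 0 - ((i : Int) - 1))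
        = (rows[i]?.getD 0 == rows[i - 1]?.getD 0 + 1) := by
      rw [Bool.eq_iff_iff]; simp only [beq_iff_eq]; omega
    rw [hb]

-- range (n+1) starts at 0 and continues with the shifted range n
theorem range_succ_shift (n : Nat) : List.range (n + 1) = 0 :: (List.range n).map (· + 1) := by
  apply List.ext_getElem
  · simp
  · intro i h1 h2
    cases i <;> simp

-- the survivors of the boundary filter are 0 followed by the interior breaks
theorem filter_bounds (rows : List Int) (hne : rows ≠ []) :
    (List.range rows.length).filter
        (fun i => i == 0 || !(rows.getD i 0 == rows.getD (i - 1) 0 + 1))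
      = 0 :: innerBreaks rows := by
  obtain ⟨m, hm⟩ := Nat.exists_eq_succ_of_ne_zero
    (show rows.length ≠ 0 by simpa using hne)
  unfold innerBreaks
  rw [hm, range_succ_shift]
  simp only [List.filter_cons]
  norm_num
  apply List.filter_congr
  intro i hi
  simp only [List.mem_map] at hi
  obtain ⟨j, _, rfl⟩ := hi
  simp

-- recurrence for the interior breaks under a cons
theorem innerBreaks_cons (x y : Int) (t : List Int) :
    innerBreaks (x :: y :: t)
      = (if y = x + 1 then ([] : List Nat) else [1]) ++ (innerBreaks (y :: t)).map (· + 1) := by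
  unfold innerBreaks
  simp only [List.length_cons]
  rw [range_succ_shift, range_succ_shift]
  simp only [List.filter_cons, List.filter_map, List.map_cons, List.map_map]
  norm_num
  have hagree : List.filter
      (fun j => !(j.succ.succ == 0) &&
        !((x :: y :: t).getD j.succ.succ 0 == (x :: y :: t).getD (j.succ.succ - 1) 0 + 1))
      (List.range t.length)
    = List.filter
      (fun j => !(j.succ == 0) &&
        !((y :: t).getD j.succ 0 == (y :: t).getD (j.succ - 1) 0 + 1))
      (List.range t.length) := by
    apply List.filter_congr
    intro j _
    simp [List.getD_cons_succ]
  by_cases h : y = x + 1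
  · simp [h, Function.comp_def, hagree, List.getD]
  · have h' : ¬ ((x :: y :: t).getD 1 0 == (x :: y :: t).getD 0 0 + 1) = true := by
      simpa [List.getD] using h
    simp [h, Function.comp_def, hagree, List.getD]

-- mapAdj ignores a prepended element when all boundaries are shifted by one
theorem mapAdj_shift (x : Int) (rows : List Int) (l : List Nat) :
    mapAdj (x :: rows) (l.map (· + 1)) = mapAdj rows l := by
  induction l with
  | nil => rfl
  | cons b t ih =>
    cases t with
    | nil => rfl
    | cons e rest =>
      simp only [List.map_cons] at ih ⊢
      rw [mapAdj, mapAdj, ih]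
      congr 1
      simp [List.getD]

theorem mapAdj_eq_spec (rows' : List Int) : ∀ x : Int,
    mapAdj (x :: rows') ((0 :: innerBreaks (x :: rows')) ++ [(x :: rows').length])
      = specRuns x x rows' := by
  induction rows' with
  | nil =>
    intro x
    simp [innerBreaks, List.range_succ, mapAdj, specRuns, List.getD]
  | cons y t ih =>
    intro x
    have hn : ((x :: y :: t).length : Nat) = ((y :: t).length) + 1 := by simp
    rw [List.cons_append, hn, innerBreaks_cons]
    by_cases h : y = x + 1
    · rw [if_pos h, List.nil_append]
      cases hE : innerBreaks (y :: t) ++ [(y :: t).length] with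
      | nil => exact absurd hE (by simp)
      | cons e rest' =>
        have hlist : (innerBreaks (y :: t)).map (· + 1) ++ [(y :: t).length + 1]
            = (e + 1) :: rest'.map (· + 1) := by
          rw [show ([(y :: t).length + 1] : List Nat) = [(y :: t).length].map (· + 1) by simp,
            ← List.map_append, hE]; simp
        rw [hlist, mapAdj]
        have hshift : mapAdj (x :: y :: t) ((e + 1) :: rest'.map (· + 1))
            = mapAdj (y :: t) (e :: rest') := by
          simpa using mapAdj_shift x (y :: t) (e :: rest')
        rw [hshift]
        have hd : y - x = 1 := by omega
        have hspec : specRuns x x (y :: t) = bump 1 (specRuns y y t) := by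
          rw [specRuns, if_pos h, specRuns_bump t x y, hd]
        rw [hspec, ← ih y, List.cons_append, hE, mapAdj]
        simp [bump, List.getD]
        omega
    · rw [if_neg h, List.singleton_append, List.cons_append, mapAdj]
      have hlist : (1 : Nat) :: ((innerBreaks (y :: t)).map (· + 1) ++ [(y :: t).length + 1])
          = ((0 :: innerBreaks (y :: t)) ++ [(y :: t).length]).map (· + 1) := by
        simp
      rw [hlist, mapAdj_shift x (y :: t), ih y, specRuns, if_neg h]
      simp [List.getD]

-- ===== VERDICT (by name: the statement is the Claim_ definition above) =====
theorem contiguous_runs_py_spec : Claim_equal_contiguous_runs_py := by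
  intro rows _
  unfold Spec_contiguous_runs_py contiguous_runs_py_alt
  cases rows with
  | nil => rfl
  | cons r rest =>
    simp only []
    rw [zip_tail_eq_mapAdj, filter_pred_eq, filter_bounds _ (by simp),
      mapAdj_eq_spec rest r, portA_eq_spec]
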